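-- pv_equiv track=rewrite | github.com/xeniagda/eink-cal | cal_render/canvas.py | text_breakpoint_indices
-- ===== SOURCE A (Python) =====
-- import unicodedata
-- from typing import Optional, Tuple, List
--
-- def text_breakpoint_indices(text: str) -> List[int]:
--     indices = []
--     for ch_idx, (ch, next) in enumerate(zip(text[:-1], text[1:])):
--         i = ch_idx+1
--         ch_cat = unicodedata.category(ch)
--         next_cat = unicodedata.category(next)
--
--         # stupid stupid stupid
--         if ch_cat[0] != next_cat[0]:
--             indices.append(i)
--
--     indices.reverse()
--     return indices
-- ===== SOURCE B (Python) =====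
-- import unicodedata
-- from typing import List
--
-- def text_breakpoint_indices(text: str) -> List[int]:
--     # Right-to-left run-skipping: repeatedly find the start of the category run
--     # containing position j; each run start (except position 0) is a boundary.
--     # Emits indices already in descending order, so no reverse is needed.
--     res = []
--     j = len(text) - 1
--     while j > 0:
--         c = unicodedata.category(text[j])[0]
--         while j > 0 and unicodedata.category(text[j - 1])[0] == c:
--             j -= 1
--         if j > 0:
--             res.append(j)
--             j -= 1
--     return res
-- ===== Notes on version B (the rewrite author's own statement) =====
-- stated objective: alternative
-- what changed: B replaces A's left-to-right adjacent-pair scan with append-and-reverse by a right-to-left run-skipping algorithm: an outer loop walks maximal same-category runs from the end of the string, an inner loop finds each run's start, and each run start is emitted directly in descending order with no reverse.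
import Mathlib
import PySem

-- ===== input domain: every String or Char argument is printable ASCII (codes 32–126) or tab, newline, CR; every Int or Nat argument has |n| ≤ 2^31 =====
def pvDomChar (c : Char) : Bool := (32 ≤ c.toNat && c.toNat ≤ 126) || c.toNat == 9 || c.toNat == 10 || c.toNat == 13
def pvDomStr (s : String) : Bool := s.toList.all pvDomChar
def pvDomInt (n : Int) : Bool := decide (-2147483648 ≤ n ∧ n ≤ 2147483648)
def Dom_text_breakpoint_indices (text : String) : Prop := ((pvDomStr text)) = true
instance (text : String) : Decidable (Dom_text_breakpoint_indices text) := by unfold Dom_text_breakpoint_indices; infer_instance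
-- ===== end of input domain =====

-- B walks maximal same-category runs right-to-left (outer loop per run, inner loop to the
-- run's start) and emits each run start directly in descending order — no reverse, no
-- pairwise zip; objective: alternative algorithm of the same O(n) cost.

-- ===== PORT A =====
-- unicodedata.category(c)[0]: exact on the domain above (printable ASCII plus tab/newline/CR)
def pyCatMajor (c : Char) : Char :=
  let n := c.toNat
  if (65 ≤ n ∧ n ≤ 90) ∨ (97 ≤ n ∧ n ≤ 122) then 'L'
  else if 48 ≤ n ∧ n ≤ 57 then 'N'
  else if n = 32 then 'Z'
  else if n = 9 ∨ n = 10 ∨ n = 13 then 'C'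
  else if n = 36 ∨ n = 43 ∨ n = 60 ∨ n = 61 ∨ n = 62 ∨ n = 94 ∨ n = 96 ∨ n = 124 ∨ n = 126 then 'S'
  else 'P'

def text_breakpoint_indices (text : String) : List Int :=
  let cs := text.toList
  let pairs := (PySem.List.slice cs none (some (-1))).zip (PySem.List.slice cs (some 1) none)
  let indices := (PySem.List.enumerate pairs 0).foldl (fun indices p =>
    let i : Int := p.1 + 1
    let ch_cat := pyCatMajor p.2.1
    let next_cat := pyCatMajor p.2.2
    if ch_cat ≠ next_cat then indices ++ [i] else indices) []
  indices.reverse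

-- ===== PORT B =====
-- inner while loop: while j > 0 and category(text[j-1])[0] == c: j -= 1
def pvSkipRun (cs : List Char) (c : Char) : Nat → Nat
  | 0 => 0
  | j + 1 => if pyCatMajor (cs.getD j ' ') == c then pvSkipRun cs c j else j + 1

-- needed by pvRunLoop's termination proof (cited in decreasing_by)
theorem pvSkipRun_le (cs : List Char) (c : Char) : ∀ j, pvSkipRun cs c j ≤ j := by
  intro j
  induction j with
  | zero => simp [pvSkipRun]
  | succ j ih =>
    unfold pvSkipRun
    split
    · omega
    · omega

-- outer while loop: per maximal same-category run, record its start (if > 0) and continue left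
def pvRunLoop (cs : List Char) (j : Nat) : List Int :=
  if j = 0 then []
  else if pvSkipRun cs (pyCatMajor (cs.getD j ' ')) j = 0 then []
  else ((pvSkipRun cs (pyCatMajor (cs.getD j ' ')) j : Nat) : Int) ::
        pvRunLoop cs (pvSkipRun cs (pyCatMajor (cs.getD j ' ')) j - 1)
termination_by j
decreasing_by
  have := pvSkipRun_le cs (pyCatMajor (cs.getD j ' ')) j
  omega

def text_breakpoint_indices_alt (text : String) : List Int :=
  pvRunLoop text.toList (text.toList.length - 1)

-- ===== PRECONDITION & SPEC =====
def Spec_text_breakpoint_indices (text : String) (out : List Int) : Prop := out = text_breakpoint_indices_alt text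
instance (text : String) (out : List Int) : Decidable (Spec_text_breakpoint_indices text out) := by unfold Spec_text_breakpoint_indices; infer_instance

-- ===== CLAIM (what is proved, stated in full; the proofs are below) =====
def Claim_equal_text_breakpoint_indices : Prop := ∀ (text : String), Dom_text_breakpoint_indices text → Spec_text_breakpoint_indices text (text_breakpoint_indices text)

-- ===== LEMMAS AND PROOFS =====

-- the common normal form: ascending boundary indices below j, as Ints
def pvAsc (cs : List Char) (j : Nat) : List Int :=
  ((List.range j).filter
      (fun k => decide (pyCatMajor (cs.getD k ' ') ≠ pyCatMajor (cs.getD (k + 1) ' ')))).map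
    (fun k => ((k + 1 : Nat) : Int))

theorem key_asc (cs : List Char) :
    ((PySem.List.enumerate ((PySem.List.slice cs none (some (-1))).zip (PySem.List.slice cs (some 1) none)) 0).filter
        (fun p => decide (pyCatMajor p.2.1 ≠ pyCatMajor p.2.2))).map (fun p => p.1 + 1)
    = (PySem.List.pyRange 1 ((cs.length : Int) - 1 + 1) 1).filter
        (fun i => decide (PySem.List.pyGet? (cs.map pyCatMajor) i ≠ PySem.List.pyGet? (cs.map pyCatMajor) (i - 1))) := by
  rw [PySem.List.slice_to_neg_one, PySem.List.slice_from_one, sub_add_cancel]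
  rw [PySem.List.enumerate_eq_map_pyRange _ (' ', ' ')]
  rw [List.filter_map, List.map_map, PySem.List.pyRange_one, PySem.List.pyRange_one,
    List.filter_map, List.filter_map, List.map_map]
  have hM : (PySem.List.len (cs.dropLast.zip cs.tail) - 0).toNat = ((cs.length : Int) - 1).toNat := by
    simp only [PySem.List.len_eq, List.length_zip, List.length_tail, List.length_dropLast, sub_zero]
    omega
  rw [hM]
  have hfil : List.filter
      (((fun p => decide (pyCatMajor p.2.1 ≠ pyCatMajor p.2.2)) ∘ fun j =>
          (j, PySem.List.pyGetD (cs.dropLast.zip cs.tail) j (' ', ' '))) ∘ fun (k : Nat) => 0 + (k : Int))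
      (List.range ((cs.length : Int) - 1).toNat)
    = List.filter
      ((fun i => decide (PySem.List.pyGet? (List.map pyCatMajor cs) i ≠ PySem.List.pyGet? (List.map pyCatMajor cs) (i - 1))) ∘
        fun (k : Nat) => 1 + (k : Int))
      (List.range ((cs.length : Int) - 1).toNat) := by
    apply List.filter_congr
    intro k hk
    rw [List.mem_range] at hk
    have hkn : k + 1 < cs.length := by omega
    simp only [Function.comp_apply, zero_add]
    rw [PySem.List.pyGetD_natCast]
    rw [List.getD_eq_getElem _ _ (by simp [List.length_zip]; omega)]
    rw [List.getElem_zip]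
    have h1 : (1 : Int) + (k : Int) = ((k + 1 : Nat) : Int) := by push_cast; ring
    rw [h1]
    rw [show ((k + 1 : Nat) : Int) - 1 = ((k : Nat) : Int) by push_cast; ring]
    rw [PySem.List.pyGet?_natCast, PySem.List.pyGet?_natCast]
    rw [List.getElem?_eq_getElem (by simpa using hkn), List.getElem?_eq_getElem (by simp; omega)]
    simp only [List.getElem_map, List.getElem_dropLast, List.getElem_tail]
    simp only [ne_eq, Option.some.injEq]
    exact decide_eq_decide.mpr (not_congr ⟨fun h => h.symm, fun h => h.symm⟩)
  rw [hfil]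
  apply List.map_congr_left
  intro k _
  show (0 : Int) + (k : Int) + 1 = 1 + (k : Int)
  omega

-- A-side bridge: the pyRange/pyGet? form of key_asc's RHS is the Nat-indexed normal form
theorem asc_bridge (cs : List Char) :
    (PySem.List.pyRange 1 ((cs.length : Int) - 1 + 1) 1).filter
        (fun i => decide (PySem.List.pyGet? (cs.map pyCatMajor) i ≠ PySem.List.pyGet? (cs.map pyCatMajor) (i - 1)))
    = pvAsc cs (cs.length - 1) := by
  rw [PySem.List.pyRange_one, List.filter_map]
  have hN : (((cs.length : Int) - 1 + 1) - 1).toNat = cs.length - 1 := by omega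
  rw [hN]
  unfold pvAsc
  have hfil : List.filter
      ((fun i => decide (PySem.List.pyGet? (cs.map pyCatMajor) i ≠ PySem.List.pyGet? (cs.map pyCatMajor) (i - 1))) ∘
        fun (k : Nat) => 1 + (k : Int)) (List.range (cs.length - 1))
    = List.filter
      (fun k => decide (pyCatMajor (cs.getD k ' ') ≠ pyCatMajor (cs.getD (k + 1) ' ')))
      (List.range (cs.length - 1)) := by
    apply List.filter_congr
    intro k hk
    rw [List.mem_range] at hk
    have hkn : k + 1 < cs.length := by omega
    simp only [Function.comp_apply]
    rw [show (1 : Int) + (k : Int) = ((k + 1 : Nat) : Int) by push_cast; ring]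
    rw [show ((k + 1 : Nat) : Int) - 1 = ((k : Nat) : Int) by push_cast; ring]
    rw [PySem.List.pyGet?_natCast, PySem.List.pyGet?_natCast]
    rw [List.getElem?_eq_getElem (by simpa using hkn), List.getElem?_eq_getElem (by simp; omega)]
    simp only [List.getElem_map, ne_eq, Option.some.injEq]
    rw [List.getD_eq_getElem cs ' ' (show k < cs.length by omega),
        List.getD_eq_getElem cs ' ' hkn]
    exact decide_eq_decide.mpr (not_congr ⟨fun h => h.symm, fun h => h.symm⟩)
  rw [hfil]
  apply List.map_congr_left
  intro k _
  push_cast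
  ring

-- every position from the returned run start up to the queried one has category c
theorem pvSkipRun_run (cs : List Char) (c : Char) :
    ∀ j i, pvSkipRun cs c j ≤ i → i < j → pyCatMajor (cs.getD i ' ') = c := by
  intro j
  induction j with
  | zero => intro i _ h; omega
  | succ j ih =>
    intro i hlo hhi
    unfold pvSkipRun at hlo
    by_cases hc : pyCatMajor (cs.getD j ' ') == c
    · rw [if_pos hc] at hlo
      by_cases hij : i < j
      · exact ih i hlo hij
      · have : i = j := by omega
        subst this
        exact eq_of_beq hc
    · rw [if_neg hc] at hlo
      omega

-- if the run start is positive, the character before it has a different category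
theorem pvSkipRun_stop (cs : List Char) (c : Char) :
    ∀ j, pvSkipRun cs c j = 0 ∨ pyCatMajor (cs.getD (pvSkipRun cs c j - 1) ' ') ≠ c := by
  intro j
  induction j with
  | zero => left; rfl
  | succ j ih =>
    unfold pvSkipRun
    by_cases hc : pyCatMajor (cs.getD j ' ') == c
    · rw [if_pos hc]; exact ih
    · rw [if_neg hc]
      right
      simpa using hc

theorem pvRunLoop_eq (cs : List Char) : ∀ j, pvRunLoop cs j = (pvAsc cs j).reverse := by
  intro j
  induction j using Nat.strong_induction_on with
  | _ j IH =>
    unfold pvRunLoop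
    by_cases h0 : j = 0
    · subst h0
      simp [pvAsc]
    · rw [if_neg h0]
      have hc : pyCatMajor (cs.getD j ' ') = pyCatMajor (cs.getD j ' ') := rfl
      have hle : pvSkipRun cs (pyCatMajor (cs.getD j ' ')) j ≤ j :=
        pvSkipRun_le cs (pyCatMajor (cs.getD j ' ')) j
      -- category is constant on [k, j]
      have hrun : ∀ i, pvSkipRun cs (pyCatMajor (cs.getD j ' ')) j ≤ i → i ≤ j →
          pyCatMajor (cs.getD i ' ') = pyCatMajor (cs.getD j ' ') := by
        intro i hlo hhi
        by_cases hij : i < j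
        · exact pvSkipRun_run cs (pyCatMajor (cs.getD j ' ')) j i hlo hij
        · have : i = j := by omega
          subst this; rfl
      -- the filter below j collapses to the filter below the run start
      have hfil : List.filter
          (fun k => decide (pyCatMajor (cs.getD k ' ') ≠ pyCatMajor (cs.getD (k + 1) ' ')))
          (List.range j)
        = List.filter
          (fun k => decide (pyCatMajor (cs.getD k ' ') ≠ pyCatMajor (cs.getD (k + 1) ' ')))
          (List.range (pvSkipRun cs (pyCatMajor (cs.getD j ' ')) j)) := by
        conv_lhs => rw [show j = pvSkipRun cs (pyCatMajor (cs.getD j ' ')) j +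
          (j - pvSkipRun cs (pyCatMajor (cs.getD j ' ')) j) by omega]
        rw [List.range_add, List.filter_append, List.filter_map]
        have hnil : List.filter
            ((fun k => decide (pyCatMajor (cs.getD k ' ') ≠ pyCatMajor (cs.getD (k + 1) ' '))) ∘
              (pvSkipRun cs (pyCatMajor (cs.getD j ' ')) j + ·))
            (List.range (j - pvSkipRun cs (pyCatMajor (cs.getD j ' ')) j)) = [] := by
          rw [List.filter_eq_nil_iff]
          intro m hm
          rw [List.mem_range] at hm
          simp only [Function.comp_apply, decide_eq_true_eq, ne_eq, Decidable.not_not]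
          exact (hrun _ (by omega) (by omega)).trans (hrun _ (by omega) (by omega)).symm
        rw [hnil, List.map_nil, List.append_nil]
      by_cases hk0 : pvSkipRun cs (pyCatMajor (cs.getD j ' ')) j = 0
      · rw [if_pos hk0]
        unfold pvAsc
        rw [hfil, hk0]
        simp
      · rw [if_neg hk0]
        obtain ⟨m, hm⟩ : ∃ m, pvSkipRun cs (pyCatMajor (cs.getD j ' ')) j = m + 1 :=
          ⟨pvSkipRun cs (pyCatMajor (cs.getD j ' ')) j - 1, by omega⟩
        unfold pvAsc
        rw [hfil, hm, List.range_succ, List.filter_append]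
        have hpred : decide (pyCatMajor (cs.getD m ' ') ≠ pyCatMajor (cs.getD (m + 1) ' ')) = true := by
          simp only [decide_eq_true_eq, ne_eq]
          have hstop := pvSkipRun_stop cs (pyCatMajor (cs.getD j ' ')) j
          rcases hstop with hstop | hstop
          · omega
          · rw [hm] at hstop
            simp only [Nat.add_sub_cancel] at hstop
            have hnext : pyCatMajor (cs.getD (m + 1) ' ') = pyCatMajor (cs.getD j ' ') :=
              hrun (m + 1) (by omega) (by omega)
            rw [hnext]
            exact hstop
        simp only [List.filter_singleton, hpred]
        rw [List.map_append, List.reverse_append]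
        simp only [cond_true, List.map_cons, List.map_nil, List.reverse_cons, List.reverse_nil,
          List.nil_append, List.singleton_append, Nat.add_sub_cancel]
        rw [IH m (by omega)]
        unfold pvAsc
        rfl

theorem text_breakpoint_indices_eq (text : String) :
    text_breakpoint_indices text = text_breakpoint_indices_alt text := by
  unfold text_breakpoint_indices text_breakpoint_indices_alt
  simp only [PySem.List.foldl_append_ite, List.nil_append]
  rw [key_asc text.toList, asc_bridge text.toList, pvRunLoop_eq]

-- ===== VERDICT (by name: the statement is the Claim_ definition above) =====
theorem text_breakpoint_indices_spec : Claim_equal_text_breakpoint_indices := by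
  intro text _
  exact text_breakpoint_indices_eq text
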